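-- pv_equiv track=rewrite | github.com/XanderYoon/HomaModule | experiments/analyze_cp_vs_tcp_runs.py | step_points
-- ===== SOURCE A (Python) =====
-- def step_points(x, y):
--     x_new = []
--     y_new = []
--     for i, (xv, yv) in enumerate(zip(x, y)):
--         if i:
--             x_new.append(xv)
--             y_new.append(y[i - 1])
--         x_new.append(xv)
--         y_new.append(yv)
--     return x_new, y_new
-- ===== SOURCE B (Python) =====
-- def step_points(x, y):
--     m = min(len(x), len(y))
--     xd = [v for v in x[:m] for _ in (0, 1)]
--     yd = [v for v in y[:m] for _ in (0, 1)]
--     return xd[1:], yd[:-1]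
-- ===== Notes on version B (the rewrite author's own statement) =====
-- stated objective: simpler
-- what changed: Replaces the indexed loop with its if-branch and y[i-1] back-lookup by a closed-form construction: double each of the first min(len(x),len(y)) elements of x and y and return xd[1:], yd[:-1].
import Mathlib
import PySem

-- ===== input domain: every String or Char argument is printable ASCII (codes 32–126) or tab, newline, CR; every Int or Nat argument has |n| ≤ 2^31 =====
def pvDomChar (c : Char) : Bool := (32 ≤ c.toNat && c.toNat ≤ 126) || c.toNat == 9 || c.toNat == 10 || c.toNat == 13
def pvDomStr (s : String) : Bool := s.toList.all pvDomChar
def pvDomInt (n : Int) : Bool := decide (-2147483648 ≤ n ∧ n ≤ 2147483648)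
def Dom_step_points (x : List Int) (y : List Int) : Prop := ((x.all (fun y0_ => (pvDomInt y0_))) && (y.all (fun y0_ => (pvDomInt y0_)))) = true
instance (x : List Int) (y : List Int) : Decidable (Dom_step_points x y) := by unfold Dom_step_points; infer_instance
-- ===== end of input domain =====

-- B replaces A's indexed loop (with its `if i:` branch and y[i-1] back-lookup) by a
-- closed form: double each element of x[:m] and y[:m] (m = min length) and return xd[1:], yd[:-1]. Objective: simpler.

-- ===== PORT A =====
-- the loop body of A (i, (xv, yv) = p); y[i-1] is ported with pyGetD: A only reads it for
-- i ≥ 1, where i-1 < len(zip(x,y)) ≤ len(y), so the index is always in range (exact).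
def stepAf (y : List Int) (acc : List Int × List Int) (p : Int × (Int × Int)) : List Int × List Int :=
  let i := p.1
  let xv := p.2.1
  let yv := p.2.2
  let acc := if i ≠ 0 then (acc.1 ++ [xv], acc.2 ++ [PySem.List.pyGetD y (i - 1) 0]) else acc
  (acc.1 ++ [xv], acc.2 ++ [yv])

def step_points (x : List Int) (y : List Int) : List Int × List Int :=
  (PySem.List.enumerate (List.zip x y) 0).foldl (stepAf y) ([], [])

-- ===== PORT B =====
-- m = min(len x, len y); xd/yd are the doubled prefixes; result (xd[1:], yd[:-1])
def step_points_alt (x : List Int) (y : List Int) : List Int × List Int :=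
  (PySem.List.slice ((PySem.List.slice x none (some (min (x.length : Int) (y.length : Int)))).flatMap (fun v => [v, v])) (some 1) none,
   PySem.List.slice ((PySem.List.slice y none (some (min (x.length : Int) (y.length : Int)))).flatMap (fun v => [v, v])) none (some (-1)))

-- ===== PRECONDITION & SPEC =====
def Spec_step_points (x : List Int) (y : List Int) (out : List Int × List Int) : Prop := out = step_points_alt x y
instance (x : List Int) (y : List Int) (out : List Int × List Int) : Decidable (Spec_step_points x y out) := by unfold Spec_step_points; infer_instance

-- ===== CLAIM (what is proved, stated in full; the proofs are below) =====
def Claim_equal_step_points : Prop := ∀ (x : List Int) (y : List Int), Dom_step_points x y → Spec_step_points x y (step_points x y)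

-- ===== LEMMAS AND PROOFS =====

lemma stepAf_ne (y : List Int) (acc : List Int × List Int) (n : Int) (p : Int × Int) (hn : n ≠ 0) :
    stepAf y acc (n, p) = (acc.1 ++ [p.1] ++ [p.1], acc.2 ++ [PySem.List.pyGetD y (n - 1) 0] ++ [p.2]) := by
  simp [stepAf, hn]

lemma stepAf_zero (y : List Int) (acc : List Int × List Int) (p : Int × Int) :
    stepAf y acc (0, p) = (acc.1 ++ [p.1], acc.2 ++ [p.2]) := by
  simp [stepAf]

-- take of min length = map fst / snd of the zip
lemma take_min_fst (x y : List Int) :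
    x.take (min x.length y.length) = (List.zip x y).map Prod.fst := by
  induction x generalizing y with
  | nil => simp
  | cons a xs ih =>
    cases y with
    | nil => simp
    | cons b ys => simp [List.zip_cons_cons, Nat.succ_min_succ, ih]

lemma take_min_snd (x y : List Int) :
    y.take (min x.length y.length) = (List.zip x y).map Prod.snd := by
  induction x generalizing y with
  | nil => simp
  | cons a xs ih =>
    cases y with
    | nil => simp
    | cons b ys => simp [List.zip_cons_cons, Nat.succ_min_succ, ih]

-- A's fold after the first element, generalized over the start index and accumulators.
lemma stepA_aux (y : List Int) :
    ∀ (w : List (Int × Int)) (n : Int) (prev : Int) (ax ay : List Int),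
      1 ≤ n →
      PySem.List.pyGetD y (n - 1) 0 = prev →
      (∀ (k : Nat) (h : k < w.length), PySem.List.pyGetD y (n + k) 0 = (w[k]).2) →
      (PySem.List.enumerate w n).foldl (stepAf y) (ax, ay) =
      (ax ++ w.flatMap (fun p => [p.1, p.1]),
       ay ++ (prev :: w.flatMap (fun p => [p.2, p.2])).dropLast) := by
  intro w
  induction w with
  | nil => intro n prev ax ay hn hp hk; simp [PySem.List.enumerate]
  | cons p w ih =>
    intro n prev ax ay hn hp hk
    have hn0 : n ≠ 0 := by omega
    rw [PySem.List.enumerate_cons, List.foldl_cons, stepAf_ne y _ n p hn0, hp]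
    have h0 : PySem.List.pyGetD y ((n + 1) - 1) 0 = p.2 := by
      have := hk 0 (by simp)
      simpa using this
    have h1 : ∀ (k : Nat) (h : k < w.length), PySem.List.pyGetD y ((n + 1) + k) 0 = (w[k]).2 := by
      intro k h
      have := hk (k + 1) (by simpa using Nat.succ_lt_succ h)
      have e : n + ((k : Int) + 1) = (n + 1) + k := by ring
      simpa [e] using this
    rw [ih (n + 1) p.2 _ _ (by omega) h0 h1]
    simp [List.dropLast_cons_of_ne_nil]

-- closed form for A over the zip list
lemma stepA_closed (x y : List Int) :
    step_points x y =
      (((List.zip x y).flatMap (fun p => [p.1, p.1])).tail,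
       ((List.zip x y).flatMap (fun p => [p.2, p.2])).dropLast) := by
  unfold step_points
  have hget : ∀ (k : Nat) (h : k < (List.zip x y).length),
      PySem.List.pyGetD y (k : Int) 0 = ((List.zip x y)[k]).2 := by
    intro k h
    have hky : k < y.length := lt_of_lt_of_le h (by simp [List.length_zip])
    rw [PySem.List.pyGetD_natCast, List.getD_eq_getElem _ _ hky]
    simp [List.getElem_zip]
  cases hz : List.zip x y with
  | nil => simp [PySem.List.enumerate]
  | cons p w =>
    rw [hz] at hget
    rw [PySem.List.enumerate_cons, List.foldl_cons, stepAf_zero]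
    have h0 : PySem.List.pyGetD y ((1 : Int) - 1) 0 = p.2 := by
      have := hget 0 (by simp)
      simpa using this
    have h1 : ∀ (k : Nat) (h : k < w.length), PySem.List.pyGetD y ((1 : Int) + k) 0 = (w[k]).2 := by
      intro k h
      have := hget (k + 1) (by simp; omega)
      have e : ((k : Int) + 1) = (1 : Int) + k := by ring
      simpa [e] using this
    have e01 : (0 : Int) + 1 = 1 := by norm_num
    rw [e01, stepA_aux y w 1 p.2 _ _ (by norm_num) h0 h1]
    simp [List.dropLast_cons_of_ne_nil]

theorem step_points_eq (x y : List Int) : step_points x y = step_points_alt x y := by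
  rw [stepA_closed]
  unfold step_points_alt
  have hm : min (x.length : Int) (y.length : Int) = ((min x.length y.length : Nat) : Int) := by
    simp [Nat.cast_min]
  rw [hm, PySem.List.slice_to_natCast x, PySem.List.slice_to_natCast y,
      take_min_fst, take_min_snd, PySem.List.slice_from_one, PySem.List.slice_to_neg_one]
  simp [List.flatMap_map]

-- ===== VERDICT (by name: the statement is the Claim_ definition above) =====
theorem step_points_spec : Claim_equal_step_points := by
  intro x y _
  exact step_points_eq x y
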